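-- pv_equiv track=rewrite | github.com/reidspreiter/Tasket-Public | _utils/sort_to_walk.py | sort_by_building
-- ===== SOURCE A (Python) =====
-- def sort_by_building(unit_numbers):
--     units_by_building = {}
--     sides = ["front", "back"]
--     ranges = {
--         "front" : [
--             (), (60, 73), (40, 49), (24, 33), (8, 17), (100, 105),
--             (206, 213), (108, 113), (218, 225), (134, 141),
--             (242, 252), (122, 129), (224, 234)
--             ],
--         "back" : [
--             (), (48, 61), (32, 41), (16, 25), (0, 9), (200, 207),
--             (104, 109), (212, 219), (112, 117), (251, 261),
--             (128, 135), (233, 243), (116, 123)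
--             ],
--     }
--
--     for i in range(1, 13):
--         units_by_building[i] = {}
--         for side in sides:
--             units_by_building[i][side] = list(filter(
--                 lambda x: ranges[side][i][0] < x < ranges[side][i][1],
--                 unit_numbers
--                 ))
--     return units_by_building
-- ===== SOURCE B (Python) =====
-- def sort_by_building(unit_numbers):
--     # (building, side, lo, hi) rows; units_by_building buckets are filled by
--     # looking each unit up in a precomputed inverse index (unit value -> bucket keys),
--     # so the main pass does one dict lookup per unit instead of 24 range scans.
--     rows = [
--         (1, "front", 60, 73), (1, "back", 48, 61),
--         (2, "front", 40, 49), (2, "back", 32, 41),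
--         (3, "front", 24, 33), (3, "back", 16, 25),
--         (4, "front", 8, 17), (4, "back", 0, 9),
--         (5, "front", 100, 105), (5, "back", 200, 207),
--         (6, "front", 206, 213), (6, "back", 104, 109),
--         (7, "front", 108, 113), (7, "back", 212, 219),
--         (8, "front", 218, 225), (8, "back", 112, 117),
--         (9, "front", 134, 141), (9, "back", 251, 261),
--         (10, "front", 242, 252), (10, "back", 128, 135),
--         (11, "front", 122, 129), (11, "back", 233, 243),
--         (12, "front", 224, 234), (12, "back", 116, 123),
--     ]
--     index = {}
--     for (i, side, lo, hi) in rows: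
--         for v in range(lo + 1, hi):
--             index.setdefault(v, []).append((i, side))
--     buckets = {(i, side): [] for (i, side, _, _) in rows}
--     for x in unit_numbers:
--         for key in index.get(x, []):
--             buckets[key].append(x)
--     return {i: {"front": buckets[(i, "front")], "back": buckets[(i, "back")]}
--             for i in range(1, 13)}
-- ===== Notes on version B (the rewrite author's own statement) =====
-- stated objective: alternative
-- what changed: B precomputes an inverse index mapping each possible unit value to the list of (building, side) bucket keys whose range contains it, then fills pre-created buckets in a single lookup-driven pass over unit_numbers, instead of A's 24 per-bucket filter scans with a range test per element per bucket.
import Mathlib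
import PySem

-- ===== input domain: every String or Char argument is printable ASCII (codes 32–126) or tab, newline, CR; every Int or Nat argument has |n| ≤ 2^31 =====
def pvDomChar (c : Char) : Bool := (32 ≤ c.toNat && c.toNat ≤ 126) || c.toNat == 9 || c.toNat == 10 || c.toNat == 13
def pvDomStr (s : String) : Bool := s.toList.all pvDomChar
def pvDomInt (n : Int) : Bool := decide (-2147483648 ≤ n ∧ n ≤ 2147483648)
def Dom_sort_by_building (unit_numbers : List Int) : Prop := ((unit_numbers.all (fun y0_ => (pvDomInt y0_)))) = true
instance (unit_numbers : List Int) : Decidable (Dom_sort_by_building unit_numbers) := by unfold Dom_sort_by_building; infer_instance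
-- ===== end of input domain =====

-- B precomputes an inverse index (unit value -> list of bucket keys) from the same ranges and fills the
-- 24 buckets in one lookup-driven pass over unit_numbers, instead of A's 24 filter scans; same results.

-- ===== PORT A =====
-- the 'ranges' dict of A (tuples () and (lo, hi) ported as List Int, [] and [lo, hi])
def pvRangesA : PySem.Dict String (List (List Int)) := PySem.Dict.ofList
  [("front", [[], [60, 73], [40, 49], [24, 33], [8, 17], [100, 105],
              [206, 213], [108, 113], [218, 225], [134, 141],
              [242, 252], [122, 129], [224, 234]]),
   ("back",  [[], [48, 61], [32, 41], [16, 25], [0, 9], [200, 207],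
              [104, 109], [212, 219], [112, 117], [251, 261],
              [128, 135], [233, 243], [116, 123]])]

-- ranges[side][i][0] / [1]; indices are always in range for side ∈ sides, 1 ≤ i ≤ 12,
-- so the defaults of getD/pyGetD are never used (Python would raise only off this range).
def pvCondA (side : String) (i : Int) (x : Int) : Bool :=
  let t := PySem.List.pyGetD (PySem.Dict.getD pvRangesA side []) i []
  decide (PySem.List.pyGetD t 0 0 < x ∧ x < PySem.List.pyGetD t 1 0)

def sort_by_building (unit_numbers : List Int) : List (Int × List (String × List Int)) :=
  let sides : List String := ["front", "back"]
  let ubb : PySem.Dict Int (PySem.Dict String (List Int)) :=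
    (PySem.List.pyRange 1 13 1).foldl
      (fun d i =>
        let d := d.insert i PySem.Dict.empty
        sides.foldl
          (fun d side =>
            d.modify i PySem.Dict.empty
              (fun inner => inner.insert side
                (unit_numbers.filter (fun x => pvCondA side i x))))
          d)
      PySem.Dict.empty
  ubb.items.map (fun p => (p.1, p.2.items))

-- ===== PORT B =====
-- the flat rows table of B: (building, side, lo, hi)
def pvRowsB : List (Int × String × Int × Int) :=
  [(1, "front", 60, 73), (1, "back", 48, 61),
   (2, "front", 40, 49), (2, "back", 32, 41),
   (3, "front", 24, 33), (3, "back", 16, 25),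
   (4, "front", 8, 17), (4, "back", 0, 9),
   (5, "front", 100, 105), (5, "back", 200, 207),
   (6, "front", 206, 213), (6, "back", 104, 109),
   (7, "front", 108, 113), (7, "back", 212, 219),
   (8, "front", 218, 225), (8, "back", 112, 117),
   (9, "front", 134, 141), (9, "back", 251, 261),
   (10, "front", 242, 252), (10, "back", 128, 135),
   (11, "front", 122, 129), (11, "back", 233, 243),
   (12, "front", 224, 234), (12, "back", 116, 123)]

-- index.setdefault(v, []).append((i, side)) is exactly Dict.modify v [] (· ++ [(i, side)])
def pvIndexB : PySem.Dict Int (List (Int × String)) :=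
  pvRowsB.foldl
    (fun d r =>
      (PySem.List.pyRange (r.2.2.1 + 1) r.2.2.2 1).foldl
        (fun d v => d.modify v [] (· ++ [(r.1, r.2.1)])) d)
    PySem.Dict.empty

-- buckets = {(i, side): [] for ...}: a dict comprehension over the distinct row keys, as an assoc list
def pvBucketsInit : PySem.Dict (Int × String) (List Int) :=
  PySem.Dict.ofList (pvRowsB.map (fun r => ((r.1, r.2.1), ([] : List Int))))

-- buckets[key].append(x): key is always present in buckets, so modify with default [] is exact
def pvFill (unit_numbers : List Int) : PySem.Dict (Int × String) (List Int) :=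
  unit_numbers.foldl
    (fun b x => (pvIndexB.getD x []).foldl (fun b k => b.modify k [] (· ++ [x])) b)
    pvBucketsInit

-- final dict comprehension over the distinct keys 1..12, as an assoc list
def sort_by_building_alt (unit_numbers : List Int) : List (Int × List (String × List Int)) :=
  let buckets := pvFill unit_numbers
  (PySem.List.pyRange 1 13 1).map (fun i =>
    (i, [("front", buckets.getD (i, "front") []), ("back", buckets.getD (i, "back") [])]))

-- ===== PRECONDITION & SPEC =====
def Spec_sort_by_building (unit_numbers : List Int) (out : List (Int × List (String × List Int))) : Prop := out = sort_by_building_alt unit_numbers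
instance (unit_numbers : List Int) (out : List (Int × List (String × List Int))) : Decidable (Spec_sort_by_building unit_numbers out) := by unfold Spec_sort_by_building; infer_instance

-- ===== CLAIM =====
def Claim_equal_sort_by_building : Prop := ∀ (unit_numbers : List Int), Dom_sort_by_building unit_numbers → Spec_sort_by_building unit_numbers (sort_by_building unit_numbers)

-- ===== LEMMAS AND PROOFS =====

-- the inner dict A builds for building i: {"front": filtered, "back": filtered}
def pvF (xs : List Int) (i : Int) : PySem.Dict String (List Int) :=
  PySem.Dict.mk [("front", xs.filter (fun x => pvCondA "front" i x)),
                 ("back", xs.filter (fun x => pvCondA "back" i x))]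

-- one iteration of A's outer loop appends (i, pvF xs i) when key i is fresh
theorem pv_step_eq (xs : List Int) (d : PySem.Dict Int (PySem.Dict String (List Int))) (i : Int)
    (h : d.contains i = false) :
    (["front", "back"].foldl
      (fun d side => d.modify i PySem.Dict.empty
        (fun inner => inner.insert side (xs.filter (fun x => pvCondA side i x))))
      (d.insert i PySem.Dict.empty))
    = PySem.Dict.mk (d.items ++ [(i, pvF xs i)]) := by
  simp only [List.foldl_cons, List.foldl_nil, PySem.Dict.modify,
    PySem.Dict.getD_insert_self, PySem.Dict.insert_insert_self]
  apply PySem.Dict.ext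
  rw [PySem.Dict.items_insert_of_not_contains]
  · rfl
  · exact h

-- A's outer loop over fresh distinct keys appends one entry per building
theorem pv_fold_range (xs : List Int) (is : List Int)
    (d : PySem.Dict Int (PySem.Dict String (List Int)))
    (h : ∀ i ∈ is, d.contains i = false) (hnd : is.Nodup) :
    (is.foldl
      (fun d i =>
        let d := d.insert i PySem.Dict.empty
        (["front", "back"] : List String).foldl
          (fun d side => d.modify i PySem.Dict.empty
            (fun inner => inner.insert side (xs.filter (fun x => pvCondA side i x))))
          d)
      d)
    = PySem.Dict.mk (d.items ++ is.map (fun i => (i, pvF xs i))) := by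
  induction is generalizing d with
  | nil => simp
  | cons i is ih =>
    rw [List.foldl_cons]; simp only []
    rw [pv_step_eq xs d i (h i (by simp))]
    rw [ih _ _ (List.nodup_cons.mp hnd).2]
    · simp
    · intro j hj
      have hji : j ≠ i := fun e => (List.nodup_cons.mp hnd).1 (e ▸ hj)
      simp only [PySem.Dict.contains, List.any_append, List.any_cons, List.any_nil,
        Bool.or_false, Bool.or_eq_false_iff]
      refine ⟨h j (List.mem_cons_of_mem _ hj), by simpa using hji.symm⟩

-- a fold appending the SAME element to each key of ks: each key's list grows by one copy per occurrence
theorem pv_getD_foldl_modify_const {κ ν : Type} [BEq κ] [LawfulBEq κ] [DecidableEq κ]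
    (ks : List κ) (a : ν) (d : PySem.Dict κ (List ν)) (c : κ) :
    (ks.foldl (fun d k => d.modify k [] (· ++ [a])) d).getD c []
      = d.getD c [] ++ List.replicate (ks.count c) a := by
  have h : ks.foldl (fun d k => d.modify k [] (· ++ [a])) d
      = (ks.map (fun k => (k, a))).foldl (fun d p => d.modify p.1 [] (· ++ [p.2])) d := by
    rw [List.foldl_map]
  rw [h, PySem.Dict.getD_foldl_modify_append]
  congr 1
  rw [List.filter_map, List.map_map]
  rw [show ((fun p : κ × ν => p.1 == c) ∘ fun k => (k, a)) = (fun k => k == c) from rfl]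
  rw [List.filter_beq, List.map_replicate]
  rfl

-- characterization of the inverse index: the keys stored at x are exactly the rows whose range contains x
theorem pv_index_char (x : Int) :
    pvIndexB.getD x []
      = (pvRowsB.filter (fun r => decide (r.2.2.1 < x ∧ x < r.2.2.2))).map (fun r => (r.1, r.2.1)) := by
  have main : ∀ (rows : List (Int × String × Int × Int)) (d : PySem.Dict Int (List (Int × String))),
      (rows.foldl
        (fun d r =>
          (PySem.List.pyRange (r.2.2.1 + 1) r.2.2.2 1).foldl
            (fun d v => d.modify v [] (· ++ [(r.1, r.2.1)])) d) d).getD x []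
      = d.getD x [] ++ (rows.filter (fun r => decide (r.2.2.1 < x ∧ x < r.2.2.2))).map (fun r => (r.1, r.2.1)) := by
    intro rows
    induction rows with
    | nil => simp
    | cons r rows ih =>
      intro d
      rw [List.foldl_cons, ih, pv_getD_foldl_modify_const, List.filter_cons]
      by_cases hx : x ∈ PySem.List.pyRange (r.2.2.1 + 1) r.2.2.2 1
      · have hc : decide (r.2.2.1 < x ∧ x < r.2.2.2) = true := by
          have := (PySem.List.mem_pyRange_one).mp hx
          simp only [decide_eq_true_eq]; omega
        rw [List.count_eq_one_of_mem (PySem.List.nodup_pyRange_one _ _) hx, hc]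
        simp
      · have hc : decide (r.2.2.1 < x ∧ x < r.2.2.2) = false := by
          simp only [decide_eq_false_iff_not]
          intro hcontra
          exact hx (PySem.List.mem_pyRange_one.mpr (by omega))
        rw [List.count_eq_zero_of_not_mem hx, hc]
        simp
  rw [show pvIndexB = _ from rfl, pvIndexB, main pvRowsB PySem.Dict.empty]
  simp [PySem.Dict.getD_empty]

-- countP over a Nodup list with a unique element satisfying f
theorem pv_countP_and_unique {α : Type} (l : List α) (f g : α → Bool) (r : α)
    (hmem : r ∈ l) (hnd : l.Nodup) (hf : f r = true)
    (h1 : ∀ r' ∈ l, f r' = true → r' = r) :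
    l.countP (fun a => f a && g a) = if g r then 1 else 0 := by
  induction l with
  | nil => cases hmem
  | cons a l ih =>
    rw [List.countP_cons]
    by_cases h : a = r
    · subst h
      have hz : l.countP (fun b => f b && g b) = 0 := by
        refine List.countP_eq_zero.mpr ?_
        intro b hb hp
        have hfb : f b = true := by revert hp; cases f b <;> simp
        have hb_eq := h1 b (List.mem_cons_of_mem _ hb) hfb
        exact (List.nodup_cons.mp hnd).1 (hb_eq ▸ hb)
      rw [hz, hf]
      simp
    · have hmem' : r ∈ l := by
        rcases List.mem_cons.mp hmem with h' | h'
        · exact absurd h'.symm h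
        · exact h'
      have hfa : f a = false := by
        by_contra hfa
        exact h (h1 a (by simp) (by simpa using hfa))
      rw [ih hmem' (List.nodup_cons.mp hnd).2 (fun r' hr' => h1 r' (List.mem_cons_of_mem _ hr'))]
      simp [hfa]

-- each bucket key appears in exactly one row (checked on the literal table)
theorem pv_rows_uniq : ∀ r ∈ pvRowsB, ∀ r' ∈ pvRowsB, (r'.1, r'.2.1) = (r.1, r.2.1) → r' = r := by
  decide

-- every bucket starts out empty (checked on the literal table)
theorem pv_init_getD : ∀ r ∈ pvRowsB, pvBucketsInit.getD (r.1, r.2.1) [] = ([] : List Int) := by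
  decide

-- how often a bucket key occurs in the index entry of x: once iff x is in that bucket's range
theorem pv_count_index (i : Int) (side : String) (lo hi : Int)
    (hmem : (i, side, lo, hi) ∈ pvRowsB) (x : Int) :
    (pvIndexB.getD x []).count (i, side)
      = if decide (lo < x ∧ x < hi) = true then 1 else 0 := by
  rw [pv_index_char, List.count_eq_countP, List.countP_map, List.countP_filter]
  have := pv_countP_and_unique pvRowsB
    (fun r => ((r.1, r.2.1) == (i, side)))
    (fun r => decide (r.2.2.1 < x ∧ x < r.2.2.2))
    (i, side, lo, hi) hmem (by decide) (by simp)
    (fun r' hr' hf => pv_rows_uniq (i, side, lo, hi) hmem r' hr' (by simpa using hf))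
  simp only [Function.comp] at this ⊢
  exact this

-- the filling pass leaves in bucket (i, side) exactly the units in its range, in input order
theorem pv_fill_getD (xs : List Int) (i : Int) (side : String) (lo hi : Int)
    (hmem : (i, side, lo, hi) ∈ pvRowsB) :
    (pvFill xs).getD (i, side) [] = xs.filter (fun x => decide (lo < x ∧ x < hi)) := by
  have main : ∀ (ys : List Int) (b : PySem.Dict (Int × String) (List Int)),
      (ys.foldl (fun b x => (pvIndexB.getD x []).foldl (fun b k => b.modify k [] (· ++ [x])) b) b).getD (i, side) []
      = b.getD (i, side) [] ++ ys.filter (fun x => decide (lo < x ∧ x < hi)) := by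
    intro ys
    induction ys with
    | nil => simp
    | cons x ys ih =>
      intro b
      rw [List.foldl_cons, ih, pv_getD_foldl_modify_const,
        pv_count_index i side lo hi hmem x, List.filter_cons]
      by_cases hc : decide (lo < x ∧ x < hi) = true
      · rw [hc]; simp
      · rw [Bool.eq_false_iff.mpr hc]; simp
  rw [pvFill, main xs pvBucketsInit]
  rw [pv_init_getD (i, side, lo, hi) hmem, List.nil_append]

-- ===== VERDICT =====
set_option maxRecDepth 10000 in
theorem sort_by_building_spec : Claim_equal_sort_by_building := by
  intro xs _
  unfold Spec_sort_by_building sort_by_building sort_by_building_alt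
  simp only []
  rw [show PySem.List.pyRange 1 13 1 = [1,2,3,4,5,6,7,8,9,10,11,12] from by decide]
  rw [pv_fold_range xs _ PySem.Dict.empty (by intro j hj; rfl) (by decide)]
  simp only [List.map_cons, List.map_nil]
  rw [pv_fill_getD xs 1 "front" 60 73 (by decide), pv_fill_getD xs 1 "back" 48 61 (by decide),
      pv_fill_getD xs 2 "front" 40 49 (by decide), pv_fill_getD xs 2 "back" 32 41 (by decide),
      pv_fill_getD xs 3 "front" 24 33 (by decide), pv_fill_getD xs 3 "back" 16 25 (by decide),
      pv_fill_getD xs 4 "front" 8 17 (by decide), pv_fill_getD xs 4 "back" 0 9 (by decide),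
      pv_fill_getD xs 5 "front" 100 105 (by decide), pv_fill_getD xs 5 "back" 200 207 (by decide),
      pv_fill_getD xs 6 "front" 206 213 (by decide), pv_fill_getD xs 6 "back" 104 109 (by decide),
      pv_fill_getD xs 7 "front" 108 113 (by decide), pv_fill_getD xs 7 "back" 212 219 (by decide),
      pv_fill_getD xs 8 "front" 218 225 (by decide), pv_fill_getD xs 8 "back" 112 117 (by decide),
      pv_fill_getD xs 9 "front" 134 141 (by decide), pv_fill_getD xs 9 "back" 251 261 (by decide),
      pv_fill_getD xs 10 "front" 242 252 (by decide), pv_fill_getD xs 10 "back" 128 135 (by decide),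
      pv_fill_getD xs 11 "front" 122 129 (by decide), pv_fill_getD xs 11 "back" 233 243 (by decide),
      pv_fill_getD xs 12 "front" 224 234 (by decide), pv_fill_getD xs 12 "back" 116 123 (by decide)]
  rfl
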